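-- pv_equiv track=rewrite | github.com/abdulzain6/Academi-AI-backend | api/lib/presentation_maker/presentation_maker.py | reduce_paragraph_by_word_limit
-- ===== SOURCE A (Python) =====
-- from typing import Any, Dict, Optional, List, Tuple
--
-- def reduce_paragraph_by_word_limit(paragraph: str, word_limit: int, current_count: int) -> Tuple[str, int]:
--     sentences = paragraph.split('. ')
--     reduced_paragraph = []
--     current_word_count = current_count
--
--     for sentence in sentences:
--         sentence_word_count = len(sentence.split())
--         new_word_count = current_word_count + sentence_word_count
--
--         if new_word_count <= word_limit:
--             reduced_paragraph.append(f"{sentence}.")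
--             current_word_count = new_word_count
--         else:
--             break
--
--     return " ".join(reduced_paragraph).rstrip(), current_word_count
-- ===== SOURCE B (Python) =====
-- def reduce_paragraph_by_word_limit(paragraph: str, word_limit: int, current_count: int):
--     sentences = paragraph.split('. ')
--     # prefix sums of word counts, seeded with current_count
--     totals = [current_count]
--     for s in sentences:
--         totals.append(totals[-1] + len(s.split()))
--     # maximal leading block whose cumulative total stays within the limit
--     k = 0
--     while k < len(sentences) and totals[k + 1] <= word_limit:
--         k += 1
--     if k == 0:
--         return "", current_count
--     return ". ".join(sentences[:k]) + ".", totals[k]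
-- ===== Notes on version B (the rewrite author's own statement) =====
-- stated objective: simpler
-- what changed: Replaces A's break-on-overflow loop that accumulates dotted sentence strings with a prefix-sum list of word counts, a cutoff scan for the maximal leading block within the limit, and a single slice-plus-'. '.join (no per-sentence string building, no rstrip).
import Mathlib
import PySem

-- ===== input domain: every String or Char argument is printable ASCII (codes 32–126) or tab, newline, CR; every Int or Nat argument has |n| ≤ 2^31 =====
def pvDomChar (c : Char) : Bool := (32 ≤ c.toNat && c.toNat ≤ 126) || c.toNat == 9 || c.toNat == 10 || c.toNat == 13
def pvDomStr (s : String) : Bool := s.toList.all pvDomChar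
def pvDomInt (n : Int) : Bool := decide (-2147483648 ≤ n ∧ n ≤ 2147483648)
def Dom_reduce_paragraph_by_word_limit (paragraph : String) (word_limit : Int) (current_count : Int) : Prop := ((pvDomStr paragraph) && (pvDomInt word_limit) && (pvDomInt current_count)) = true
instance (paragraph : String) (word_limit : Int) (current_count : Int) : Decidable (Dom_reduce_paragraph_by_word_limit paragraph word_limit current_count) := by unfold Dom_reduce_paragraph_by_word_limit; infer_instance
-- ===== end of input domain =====

-- B replaces A's break-on-overflow accumulator loop by a prefix-sum list plus a cutoff scan
-- and a single slice-and-join (objective: simpler decomposition; same cost).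

-- ===== PORT A =====

-- len(sentence.split())
def pvWc (s : List Char) : Int := ((PySem.Chars.split₀ s).length : Int)

-- the for-loop with break: state = (reduced_paragraph, current_word_count)
def pvAloop (word_limit : Int) : List (List Char) → List (List Char) → Int → List (List Char) × Int
  | [], acc, c => (acc, c)
  | s :: rest, acc, c =>
      let n := c + pvWc s
      if n ≤ word_limit then pvAloop word_limit rest (acc ++ [s ++ ['.']]) n
      else (acc, c)

def reduce_paragraph_by_word_limit (paragraph : String) (word_limit : Int) (current_count : Int) : String × Int :=
  let sentences := PySem.Chars.splitOn paragraph.toList ['.', ' ']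
  let r := pvAloop word_limit sentences [] current_count
  (String.ofList (PySem.Chars.rstrip (PySem.Chars.join [' '] r.1)), r.2)

-- ===== PORT B =====

-- totals[1:]: the running prefix sums (the appended tail of B's `totals` list)
def pvTotalsAux (word_limit : Int) (c : Int) : List (List Char) → List Int
  | [] => []
  | s :: rest => (c + pvWc s) :: pvTotalsAux word_limit (c + pvWc s) rest

-- the while-loop: k = length of the leading block of prefix sums ≤ word_limit
def pvCut (word_limit : Int) : List Int → Nat
  | [] => 0
  | t :: rest => if t ≤ word_limit then 1 + pvCut word_limit rest else 0

def reduce_paragraph_by_word_limit_alt (paragraph : String) (word_limit : Int) (current_count : Int) : String × Int :=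
  let sentences := PySem.Chars.splitOn paragraph.toList ['.', ' ']
  let tail := pvTotalsAux word_limit current_count sentences
  let k := pvCut word_limit tail
  if k = 0 then ("", current_count)
  else
    -- totals[k] with totals = current_count :: tail; k ≤ tail.length always, so getD is exact
    (String.ofList (PySem.Chars.join ['.', ' '] (sentences.take k) ++ ['.']),
     (current_count :: tail).getD k 0)

-- ===== PRECONDITION & SPEC =====
def Spec_reduce_paragraph_by_word_limit (paragraph : String) (word_limit : Int) (current_count : Int) (out : String × Int) : Prop := out = reduce_paragraph_by_word_limit_alt paragraph word_limit current_count
instance (paragraph : String) (word_limit : Int) (current_count : Int) (out : String × Int) : Decidable (Spec_reduce_paragraph_by_word_limit paragraph word_limit current_count out) := by unfold Spec_reduce_paragraph_by_word_limit; infer_instance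

-- ===== CLAIM (what is proved, stated in full; the proofs are below) =====
def Claim_equal_reduce_paragraph_by_word_limit : Prop := ∀ (paragraph : String) (word_limit : Int) (current_count : Int), Dom_reduce_paragraph_by_word_limit paragraph word_limit current_count → Spec_reduce_paragraph_by_word_limit paragraph word_limit current_count (reduce_paragraph_by_word_limit paragraph word_limit current_count)

-- ===== LEMMAS AND PROOFS =====

-- A's loop described by B's quantities.
theorem pvAloop_eq (w : Int) (l : List (List Char)) : ∀ (acc : List (List Char)) (c : Int),
    pvAloop w l acc c =
      (acc ++ (l.take (pvCut w (pvTotalsAux w c l))).map (· ++ ['.']),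
       (c :: pvTotalsAux w c l).getD (pvCut w (pvTotalsAux w c l)) 0) := by
  induction l with
  | nil => intro acc c; simp [pvAloop, pvTotalsAux, pvCut]
  | cons s rest ih =>
    intro acc c
    simp only [pvAloop, pvTotalsAux, pvCut]
    by_cases h : c + pvWc s ≤ w
    · rw [if_pos h, ih, Nat.add_comm 1]
      simp [h, List.take_succ_cons,]
    · simp [h]

theorem pv_join_dot (l : List (List Char)) (h : l ≠ []) :
    PySem.Chars.join [' '] (l.map (· ++ ['.'])) = PySem.Chars.join ['.', ' '] l ++ ['.'] := by
  induction l with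
  | nil => simp at h
  | cons s rest ih =>
    cases rest with
    | nil => simp [PySem.Chars.join, List.intercalate]
    | cons t rest' =>
      simp only [PySem.Chars.join] at *
      have hi : ∀ (sep a : List Char) (b : List Char) (l : List (List Char)),
          List.intercalate sep (a :: b :: l) = a ++ sep ++ List.intercalate sep (b :: l) := by
        intro sep a b l; simp [List.intercalate, List.intersperse]
      have ih' := ih (by simp)
      simp only [List.map_cons] at ih' ⊢
      rw [hi, ih', hi]
      simp

theorem pv_rstrip_dot (l : List Char) :
    PySem.Chars.rstrip (l ++ ['.']) = l ++ ['.'] := by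
  have h : PySem.Chars.isspace '.' = false := by decide
  simp [PySem.Chars.rstrip, h]

-- ===== VERDICT (by name: the statement is the Claim_ definition above) =====
theorem reduce_paragraph_by_word_limit_spec : Claim_equal_reduce_paragraph_by_word_limit := by
  intro paragraph word_limit current_count _
  show _ = _
  unfold reduce_paragraph_by_word_limit reduce_paragraph_by_word_limit_alt
  simp only [pvAloop_eq, List.nil_append]
  set sentences := PySem.Chars.splitOn paragraph.toList ['.', ' '] with hs
  set k := pvCut word_limit (pvTotalsAux word_limit current_count sentences) with hk
  by_cases h0 : k = 0
  · simp [h0, PySem.Chars.join, List.intercalate, PySem.Chars.rstrip]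
  · have htake : sentences.take k ≠ [] := by
      intro he
      have : k ≤ sentences.length ∨ sentences = [] := by
        rcases sentences with _ | ⟨a, as⟩
        · right; rfl
        · left
          -- k counts a prefix of pvTotalsAux, whose length is sentences.length
          have : ∀ (c : Int) (l : List (List Char)), pvCut word_limit (pvTotalsAux word_limit c l) ≤ l.length := by
            intro c l
            induction l generalizing c with
            | nil => simp [pvTotalsAux, pvCut]
            | cons x xs ih =>
              simp only [pvTotalsAux, pvCut, List.length_cons]
              split
              · have := ih (c + pvWc x); omega
              · omega
          exact this current_count (a :: as)
      rcases this with hle | hnil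
      · have := List.length_take_of_le hle ▸ congrArg List.length he
        simp at this
        exact h0 (by omega)
      · apply h0
        rw [hk, hnil]; rfl
    simp only [h0, if_false]
    rw [pv_join_dot _ htake, pv_rstrip_dot]
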